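-- pv_equiv track=rewrite | github.com/nyberry/nyberry | bitcount.py | count_dominant_patterns
-- ===== SOURCE A (Python) =====
-- from itertools import product
--
-- def count_dominant_patterns(n):
--     """
--     Loops through every binary string of length n.
--     Counts how many strings have:
--       - more '11' than '10'
--       - more '10' than '11'
--       - equal numbers
--     """
--
--     count_11s = 0
--     count_10s = 0
--     ties = 0
--
--     for bits in product("01", repeat=n):
--         s = "".join(bits)
--
--         c11 = 0
--         c10 = 0
--
--         for i in range(len(s) - 1):
--             pair = s[i:i+2]
--             if pair == "11":
--                 c11 += 1
--             elif pair == "10":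
--                 c10 += 1
--
--         if c11 > c10:
--             count_11s += 1
--         elif c10 > c11:
--             count_10s += 1
--         else:
--             ties += 1
--
--         winstring = "tie"
--         if c11>c10:
--             winstring = "11s win"
--         elif c10>c11:
--             winstring = "10s win"
--
--         print (f"{s}: 11s={c11}, 10s={c10}, {winstring}" )
--
--     return count_11s, count_10s, ties
-- ===== SOURCE B (Python) =====
-- def count_dominant_patterns(n):
--     # Iterative DFS with an explicit stack of (last_bit, c11-c10, bits_left)
--     # frames; no string materialisation, no per-string rescans.
--     # NOTE: A also prints one line per string; B computes the return value only.
--     c11s = 0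
--     c10s = 0
--     ties = 0
--     stack = [(-1, 0, n)]
--     while stack:
--         last, d, k = stack.pop()
--         if k <= 0:
--             if d > 0:
--                 c11s += 1
--             elif d < 0:
--                 c10s += 1
--             else:
--                 ties += 1
--         else:
--             # push the '1' branch first so the '0' branch is popped first
--             stack.append((1, d + 1 if last == 1 else d, k - 1))
--             stack.append((0, d - 1 if last == 1 else d, k - 1))
--     return (c11s, c10s, ties)
-- ===== Notes on version B (the rewrite author's own statement) =====
-- stated objective: alternative
-- what changed: Replaces the itertools.product enumeration with per-string rescans by an iterative explicit-stack DFS over bit positions that threads only the previous bit and the running c11-c10 difference, classifying at the leaves (B computes the return value only; it does not print A's per-string lines).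
import Mathlib
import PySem

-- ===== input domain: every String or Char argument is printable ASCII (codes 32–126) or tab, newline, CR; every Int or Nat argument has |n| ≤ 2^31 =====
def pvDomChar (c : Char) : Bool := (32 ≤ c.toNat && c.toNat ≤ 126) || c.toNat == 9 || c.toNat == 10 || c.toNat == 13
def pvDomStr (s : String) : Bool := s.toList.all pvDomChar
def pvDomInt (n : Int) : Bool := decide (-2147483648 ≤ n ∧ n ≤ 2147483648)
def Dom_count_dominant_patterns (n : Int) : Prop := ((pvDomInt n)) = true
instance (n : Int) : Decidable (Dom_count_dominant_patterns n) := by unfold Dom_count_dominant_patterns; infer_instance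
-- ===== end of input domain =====

-- B replaces the product enumeration + per-string rescans by a DFS threading the
-- running c11-c10 difference (alternative decomposition; return value only —
-- A also prints one line per string, B does not print).

-- ===== PORT A =====
-- itertools.product("01", repeat=k), lexicographic (first factor varies slowest)
def prodA : Nat → List (List Char)
  | 0 => [[]]
  | k + 1 => (['0', '1']).flatMap (fun c => (prodA k).map (fun t => c :: t))

-- the inner 'for i in range(len(s)-1)' loop computing (c11, c10); s as List Char,
-- pair = s[i:i+2] via PySem.List.slice (exact)
def scanPairsA (s : List Char) : Int × Int :=
  (PySem.List.pyRange 0 ((s.length : Int) - 1) 1).foldl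
    (fun (c : Int × Int) i =>
      let pair := PySem.List.slice s (some i) (some (i + 2))
      if pair = ['1', '1'] then (c.1 + 1, c.2)
      else if pair = ['1', '0'] then (c.1, c.2 + 1)
      else c)
    (0, 0)

-- the outer loop; the winstring/print lines only produce output and are omitted
def count_dominant_patterns (n : Int) : Int × Int × Int :=
  (prodA n.toNat).foldl
    (fun (acc : Int × Int × Int) s =>
      let c := scanPairsA s
      if c.1 > c.2 then (acc.1 + 1, acc.2.1, acc.2.2)
      else if c.2 > c.1 then (acc.1, acc.2.1 + 1, acc.2.2)
      else (acc.1, acc.2.1, acc.2.2 + 1))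
    (0, 0, 0)

-- ===== PORT B =====
-- stack weight, used only as the termination measure of the while loop
def frameW (k : Int) : Nat := 2 ^ (k.toNat + 1) - 1
def stackW (l : List (Int × Int × Int)) : Nat := (l.map (fun f => frameW f.2.2)).sum

-- the while loop over the explicit stack; the stack top is the list head
-- (Python pops/appends at the list's end)
def loopB : List (Int × Int × Int) → (Int × Int × Int) → (Int × Int × Int)
  | [], acc => acc
  | (last, d, k) :: rest, acc =>
    if h : k ≤ 0 then
      loopB rest
        (if d > 0 then (acc.1 + 1, acc.2.1, acc.2.2)
         else if d < 0 then (acc.1, acc.2.1 + 1, acc.2.2)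
         else (acc.1, acc.2.1, acc.2.2 + 1))
    else
      loopB ((0, if last = 1 then d - 1 else d, k - 1) ::
             (1, if last = 1 then d + 1 else d, k - 1) :: rest) acc
termination_by l _ => stackW l
decreasing_by
  · have h1 : 2 ^ 1 ≤ 2 ^ (k.toNat + 1) := Nat.pow_le_pow_right (by norm_num) (by omega)
    norm_num at h1
    simp only [stackW, List.map_cons, List.sum_cons, frameW]
    omega
  · have ht : k.toNat = (k - 1).toNat + 1 := by omega
    have hp : 2 ^ (k.toNat + 1) = 2 * 2 ^ ((k - 1).toNat + 1) := by
      rw [ht]; ring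
    have h1 : 1 ≤ 2 ^ ((k - 1).toNat + 1) := Nat.one_le_two_pow
    simp only [stackW, List.map_cons, List.sum_cons, frameW]
    omega

def count_dominant_patterns_alt (n : Int) : Int × Int × Int :=
  loopB [(-1, 0, n)] (0, 0, 0)

-- ===== PRECONDITION & SPEC =====
-- Pre_ excludes n < 0, where Python A raises ValueError (product with negative repeat).
def Pre_count_dominant_patterns (n : Int) : Prop := 0 ≤ n
instance (n : Int) : Decidable (Pre_count_dominant_patterns n) := by unfold Pre_count_dominant_patterns; infer_instance
def pvWitness_count_dominant_patterns : Int := 3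

def Spec_count_dominant_patterns (n : Int) (out : Int × Int × Int) : Prop := out = count_dominant_patterns_alt n
instance (n : Int) (out : Int × Int × Int) : Decidable (Spec_count_dominant_patterns n out) := by unfold Spec_count_dominant_patterns; infer_instance

-- ===== CLAIM (what is proved, stated in full; the proofs are below) =====
def Claim_equal_count_dominant_patterns : Prop := ∀ (n : Int), Dom_count_dominant_patterns n → Pre_count_dominant_patterns n → Spec_count_dominant_patterns n (count_dominant_patterns n)

-- ===== LEMMAS AND PROOFS =====

def add3 (a b : Int × Int × Int) : Int × Int × Int :=
  (a.1 + b.1, a.2.1 + b.2.1, a.2.2 + b.2.2)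

-- recursive value of one stack frame (proof-side description of the DFS)
def dfsS (last d k : Int) : Int × Int × Int :=
  if h : k ≤ 0 then
    if d > 0 then (1, 0, 0)
    else if d < 0 then (0, 1, 0)
    else (0, 0, 1)
  else
    add3 (dfsS 0 (if last = 1 then d - 1 else d) (k - 1))
         (dfsS 1 (if last = 1 then d + 1 else d) (k - 1))
termination_by k.toNat
decreasing_by all_goals omega

def frameSum : List (Int × Int × Int) → Int × Int × Int
  | [] => (0, 0, 0)
  | f :: r => add3 (dfsS f.1 f.2.1 f.2.2) (frameSum r)

-- spec-level pair-difference of a bit string, threaded like B does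
def bitOf (c : Char) : Int := if c = '1' then 1 else 0
def stepD (last : Int) (c : Char) : Int :=
  if last = 1 then (if c = '1' then 1 else -1) else 0
def dctx : Int → List Char → Int
  | _, [] => 0
  | last, c :: t => stepD last c + dctx (bitOf c) t

def classify3 (d : Int) : Int × Int × Int :=
  if d > 0 then (1, 0, 0) else if d < 0 then (0, 1, 0) else (0, 0, 1)

-- structural version of A's inner scan
def pairCnt : List Char → Int × Int
  | [] => (0, 0)
  | [_] => (0, 0)
  | x :: y :: t =>
    let r := pairCnt (y :: t)
    if ([x, y] : List Char) = ['1', '1'] then (r.1 + 1, r.2)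
    else if ([x, y] : List Char) = ['1', '0'] then (r.1, r.2 + 1)
    else r

def sum3 (l : List (List Char)) (f : List Char → Int × Int × Int) : Int × Int × Int :=
  l.foldl (fun a s => add3 a (f s)) (0, 0, 0)

lemma add3_zero_left (x : Int × Int × Int) : add3 (0, 0, 0) x = x := by
  simp [add3]

lemma add3_assoc (a b c : Int × Int × Int) :
    add3 (add3 a b) c = add3 a (add3 b c) := by
  simp [add3, add_assoc]

lemma foldl_add3 (l : List (List Char)) (f : List Char → Int × Int × Int)
    (a : Int × Int × Int) :
    l.foldl (fun acc s => add3 acc (f s)) a = add3 a (sum3 l f) := by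
  induction l generalizing a with
  | nil => simp [sum3, add3]
  | cons s t ih =>
    have hs : sum3 (s :: t) f = add3 (f s) (sum3 t f) := by
      simp only [sum3, List.foldl_cons, add3_zero_left]
      exact ih _
    rw [List.foldl_cons, ih, hs, add3_assoc]

lemma sum3_append (l₁ l₂ : List (List Char)) (f : List Char → Int × Int × Int) :
    sum3 (l₁ ++ l₂) f = add3 (sum3 l₁ f) (sum3 l₂ f) := by
  simp only [sum3, List.foldl_append]
  exact foldl_add3 l₂ f _

lemma sum3_map (l : List (List Char)) (g : List Char → List Char)
    (f : List Char → Int × Int × Int) :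
    sum3 (l.map g) f = sum3 l (fun s => f (g s)) := by
  simp [sum3, List.foldl_map]

lemma sum3_congr (l : List (List Char)) (f g : List Char → Int × Int × Int)
    (h : ∀ s, f s = g s) : sum3 l f = sum3 l g := by
  simp only [sum3]; congr 1; funext a s; rw [h]

-- the DFS computes the classified sum over all continuations
lemma dfsS_eq_sum : ∀ (j : Nat) (last d : Int),
    dfsS last d (j : Int) = sum3 (prodA j) (fun s => classify3 (d + dctx last s)) := by
  intro j
  induction j with
  | zero =>
    intro last d
    rw [dfsS, dif_pos (by omega : ((0 : Nat) : Int) ≤ 0)]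
    show classify3 d = _
    simp only [prodA, sum3, List.foldl_cons, List.foldl_nil, add3_zero_left, dctx, add_zero]
  | succ j ih =>
    intro last d
    rw [dfsS]
    have h0 : ¬ ((j + 1 : Nat) : Int) ≤ 0 := by push_cast; omega
    rw [dif_neg h0]
    have h1 : ((j + 1 : Nat) : Int) - 1 = (j : Int) := by push_cast; ring
    rw [h1, ih, ih]
    have hp : prodA (j + 1)
        = (prodA j).map (fun t => '0' :: t) ++ (prodA j).map (fun t => '1' :: t) := by
      simp [prodA]
    rw [hp, sum3_append, sum3_map, sum3_map]
    congr 1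
    · apply sum3_congr; intro s
      have : dctx last ('0' :: s) = stepD last '0' + dctx 0 s := by
        simp [dctx, bitOf]
      rw [this]
      have : d + (stepD last '0' + dctx 0 s)
          = (if last = 1 then d - 1 else d) + dctx 0 s := by
        simp [stepD]; split_ifs <;> ring
      rw [this]
    · apply sum3_congr; intro s
      have : dctx last ('1' :: s) = stepD last '1' + dctx 1 s := by
        simp [dctx, bitOf]
      rw [this]
      have : d + (stepD last '1' + dctx 1 s)
          = (if last = 1 then d + 1 else d) + dctx 1 s := by
        simp [stepD]; split_ifs <;> ring
      rw [this]

-- A's index/slice scan equals the structural scan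
def bodyS (s : List Char) (c : Int × Int) (i : Int) : Int × Int :=
  let pair := PySem.List.slice s (some i) (some (i + 2))
  if pair = ['1', '1'] then (c.1 + 1, c.2)
  else if pair = ['1', '0'] then (c.1, c.2 + 1)
  else c

lemma scanPairsA_gen : ∀ (s : List Char) (c : Int × Int),
    (PySem.List.pyRange 0 ((s.length : Int) - 1) 1).foldl (bodyS s) c
    = (c.1 + (pairCnt s).1, c.2 + (pairCnt s).2) := by
  intro s
  induction s with
  | nil => intro c; rw [PySem.List.pyRange_one_eq_nil (by simp)]; simp [pairCnt]
  | cons x s' ih =>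
    cases s' with
    | nil =>
      intro c
      rw [PySem.List.pyRange_one_eq_nil (by simp)]
      simp [pairCnt]
    | cons y t =>
      intro c
      have hL : (((x :: y :: t).length : Nat) : Int) - 1 = ((y :: t).length : Int) := by
        push_cast [List.length_cons]; ring
      rw [hL]
      have hpos : (0 : Int) < ((y :: t).length : Int) := by
        exact_mod_cast Nat.succ_pos t.length
      rw [PySem.List.pyRange_one_cons hpos, List.foldl_cons]
      have hpair0 : PySem.List.slice (x :: y :: t) (some 0) (some (0 + 2)) = [x, y] := by
        rw [PySem.List.slice_toNat _ (by norm_num) (by norm_num)]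
        rfl
      have h0 : bodyS (x :: y :: t) c 0
          = (if ([x, y] : List Char) = ['1', '1'] then (c.1 + 1, c.2)
             else if ([x, y] : List Char) = ['1', '0'] then (c.1, c.2 + 1)
             else c) := by
        simp only [bodyS, hpair0]
      have hrest : ∀ (c' : Int × Int),
          (PySem.List.pyRange (0 + 1) ((y :: t).length : Int) 1).foldl (bodyS (x :: y :: t)) c'
          = (PySem.List.pyRange 0 (((y :: t).length : Int) - 1) 1).foldl (bodyS (y :: t)) c' := by
        intro c'
        rw [PySem.List.pyRange_one, PySem.List.pyRange_one]
        have hbnd : ((((y :: t).length : Int) - (0 + 1)).toNat : Nat)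
            = ((((y :: t).length : Int) - 1 - 0).toNat : Nat) := by omega
        rw [hbnd, List.foldl_map, List.foldl_map]
        have hfun : (fun (a : Int × Int) (k : Nat) => bodyS (x :: y :: t) a (0 + 1 + (k : Int)))
            = (fun (a : Int × Int) (k : Nat) => bodyS (y :: t) a (0 + (k : Int))) := by
          funext a k
          have hsl : PySem.List.slice (x :: y :: t) (some (0 + 1 + (k : Int)))
                (some (0 + 1 + (k : Int) + 2))
              = PySem.List.slice (y :: t) (some (0 + (k : Int))) (some (0 + (k : Int) + 2)) := by
            rw [PySem.List.slice_toNat _ (by omega) (by omega),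
                PySem.List.slice_toNat _ (by omega) (by omega)]
            have h1 : (0 + 1 + (k : Int)).toNat = k + 1 := by omega
            have h2 : (0 + 1 + (k : Int) + 2).toNat = k + 3 := by omega
            have h3 : (0 + (k : Int)).toNat = k := by omega
            have h4 : (0 + (k : Int) + 2).toNat = k + 2 := by omega
            rw [h1, h2, h3, h4]
            have hd : (x :: y :: t).drop (k + 1) = (y :: t).drop k := rfl
            rw [hd]
            congr 1
            omega
          simp only [bodyS, hsl]
        rw [hfun]
      rw [hrest, ih]
      rw [h0]
      show _ = (c.1 + (pairCnt (x :: y :: t)).1, c.2 + (pairCnt (x :: y :: t)).2)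
      simp only [pairCnt]
      split_ifs <;> simp <;> ring

lemma scanPairsA_eq (s : List Char) : scanPairsA s = pairCnt s := by
  have h : scanPairsA s
      = (PySem.List.pyRange 0 ((s.length : Int) - 1) 1).foldl (bodyS s) (0, 0) := rfl
  rw [h, scanPairsA_gen]
  simp

-- connect the structural scan's difference to dctx
lemma dctx_bitOf : ∀ (t : List Char) (x : Char),
    (∀ c ∈ t, c = '0' ∨ c = '1') →
    dctx (bitOf x) t = (pairCnt (x :: t)).1 - (pairCnt (x :: t)).2 := by
  intro t
  induction t with
  | nil => intro x _; simp [dctx, pairCnt]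
  | cons y t ih =>
    intro x hbin
    have hy01 : y = '0' ∨ y = '1' := hbin y (by simp)
    show stepD (bitOf x) y + dctx (bitOf y) (t) = _
    rw [ih y (fun c hc => hbin c (by simp [hc]))]
    simp only [pairCnt, stepD, bitOf]
    rcases hy01 with hy | hy <;> by_cases hx : x = '1' <;>
      simp [hx, hy] <;> ring

lemma dctx_start (s : List Char) (hbin : ∀ c ∈ s, c = '0' ∨ c = '1') :
    dctx (-1) s = (pairCnt s).1 - (pairCnt s).2 := by
  cases s with
  | nil => simp [dctx, pairCnt]
  | cons x t =>
    show stepD (-1) x + dctx (bitOf x) t = _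
    rw [dctx_bitOf t x (fun c hc => hbin c (by simp [hc]))]
    simp [stepD]

lemma prodA_binary : ∀ (j : Nat), ∀ s ∈ prodA j, ∀ c ∈ s, c = '0' ∨ c = '1' := by
  intro j
  induction j with
  | zero => intro s hs; simp [prodA] at hs; simp [hs]
  | succ j ih =>
    intro s hs
    simp only [prodA, List.mem_flatMap, List.mem_map] at hs
    obtain ⟨c0, hc0, t, ht, rfl⟩ := hs
    intro c hc
    rcases List.mem_cons.mp hc with rfl | hct
    · simp at hc0; tauto
    · exact ih t ht c hct

lemma bodyA_eq (acc : Int × Int × Int) (s : List Char)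
    (hbin : ∀ c ∈ s, c = '0' ∨ c = '1') :
    (let c := scanPairsA s
     if c.1 > c.2 then (acc.1 + 1, acc.2.1, acc.2.2)
     else if c.2 > c.1 then (acc.1, acc.2.1 + 1, acc.2.2)
     else (acc.1, acc.2.1, acc.2.2 + 1))
    = add3 acc (classify3 (dctx (-1) s)) := by
  rw [dctx_start s hbin, ← scanPairsA_eq]
  simp only [classify3, add3]
  rcases h : scanPairsA s with ⟨p, q⟩
  simp only
  by_cases h1 : p > q
  · rw [if_pos h1, if_pos (by omega : p - q > 0)]; simp
  · rw [if_neg h1]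
    by_cases h2 : q > p
    · rw [if_pos h2, if_neg (by omega : ¬ p - q > 0), if_pos (by omega : p - q < 0)]; simp
    · rw [if_neg h2, if_neg (by omega : ¬ p - q > 0), if_neg (by omega : ¬ p - q < 0)]
      simp

lemma add3_zero_right (x : Int × Int × Int) : add3 x (0, 0, 0) = x := by
  simp [add3]

lemma loopB_eq : ∀ (stack : List (Int × Int × Int)) (acc : Int × Int × Int),
    loopB stack acc = add3 acc (frameSum stack) := by
  intro stack acc
  induction stack, acc using loopB.induct with
  | case1 acc => simp [loopB, frameSum, add3_zero_right]
  | case2 last d k rest acc h ih =>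
    rw [loopB, dif_pos h]
    refine ih.trans ?_
    show _ = add3 acc (frameSum ((last, d, k) :: rest))
    have hf : frameSum ((last, d, k) :: rest) = add3 (classify3 d) (frameSum rest) := by
      show add3 (dfsS last d k) _ = _
      rw [dfsS, dif_pos h]; rfl
    rw [hf, ← add3_assoc]
    congr 1
    simp only [classify3, add3]
    split_ifs <;> simp
  | case3 last d k rest acc h ih =>
    rw [loopB, dif_neg h]
    refine ih.trans ?_
    simp only [dite_eq_ite]
    show _ = add3 acc (frameSum ((last, d, k) :: rest))
    have hf : frameSum ((last, d, k) :: rest)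
        = add3 (add3 (dfsS 0 (if last = 1 then d - 1 else d) (k - 1))
                     (dfsS 1 (if last = 1 then d + 1 else d) (k - 1))) (frameSum rest) := by
      show add3 (dfsS last d k) _ = _
      rw [dfsS, dif_neg h]
    rw [hf]
    simp only [frameSum, add3, Prod.ext_iff]
    refine ⟨by ring, by ring, by ring⟩

-- ===== VERDICT (by name: the statement is the Claim_ definition above) =====
theorem count_dominant_patterns_spec : Claim_equal_count_dominant_patterns := by
  intro n _ hpre
  unfold Spec_count_dominant_patterns count_dominant_patterns count_dominant_patterns_alt
  obtain ⟨j, rfl⟩ : ∃ j : Nat, n = (j : Int) := ⟨n.toNat, (Int.toNat_of_nonneg hpre).symm⟩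
  simp only [Int.toNat_natCast]
  rw [loopB_eq]
  show _ = add3 (0, 0, 0) (add3 (dfsS (-1) 0 (j : Int)) (frameSum []))
  rw [show frameSum [] = ((0, 0, 0) : Int × Int × Int) from rfl, add3_zero_right, add3_zero_left]
  rw [dfsS_eq_sum]
  rw [PySem.List.foldl_congr_mem (prodA j) _
        (fun acc s => add3 acc (classify3 (0 + dctx (-1) s))) (0, 0, 0)
        (by
          intro acc s hs
          show _ = add3 acc (classify3 (0 + dctx (-1) s))
          rw [zero_add]
          exact bodyA_eq acc s (prodA_binary j s hs))]
  rfl
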